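-- pv_equiv track=rewrite | github.com/myoshi2891/Algorithm-DataStructures-Math-SQL | Algorithm/DynamicProgramming/atCoder/MinimaxPrinciple/A35/A35.py | solve
-- ===== SOURCE A (Python) =====
-- def solve(A):
--     N = len(A)
--     dp = [[None] * N for _ in range(N)]
--
--     def dfs(l, r):
--         if l == r:
--             return A[l]
--         if dp[l][r] is not None:
--             return dp[l][r]
--
--         taro_turn = (r - l + 1) % 2 == N % 2
--
--         if taro_turn:
--             dp[l][r] = max(dfs(l + 1, r), dfs(l, r - 1))
--         else:
--             dp[l][r] = min(dfs(l + 1, r), dfs(l, r - 1))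
--
--         return dp[l][r]
--
--     return dfs(0, N - 1)
-- ===== SOURCE B (Python) =====
-- def solve(A):
--     N = len(A)
--     cur = list(A)  # values for all intervals of length 1
--     for length in range(2, N + 1):
--         if length % 2 == N % 2:
--             cur = [max(cur[l + 1], cur[l]) for l in range(len(cur) - 1)]
--         else:
--             cur = [min(cur[l + 1], cur[l]) for l in range(len(cur) - 1)]
--     return cur[0]
-- ===== Notes on version B (the rewrite author's own statement) =====
-- stated objective: faster
-- what changed: Replaces A's memoized top-down recursion over (l,r) intervals with a bottom-up 1D rolling-row DP: one list per interval length, each row obtained by combining adjacent entries of the previous row, using O(n) memory and no recursion or per-call overhead.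
import Mathlib
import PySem

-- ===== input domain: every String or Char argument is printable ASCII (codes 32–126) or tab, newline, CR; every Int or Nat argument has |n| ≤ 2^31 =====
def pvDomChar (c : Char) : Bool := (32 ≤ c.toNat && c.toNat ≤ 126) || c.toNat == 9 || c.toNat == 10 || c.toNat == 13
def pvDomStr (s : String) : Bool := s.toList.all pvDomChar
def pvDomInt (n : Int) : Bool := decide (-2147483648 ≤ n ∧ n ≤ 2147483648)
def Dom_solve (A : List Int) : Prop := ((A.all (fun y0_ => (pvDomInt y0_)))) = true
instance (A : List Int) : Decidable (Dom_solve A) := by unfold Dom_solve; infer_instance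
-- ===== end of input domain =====

-- B replaces A's memoized top-down interval recursion by a bottom-up rolling-row DP (one
-- 1D list per interval length); same values, different decomposition.

-- ===== PORT A =====
-- dfs of A, ported as the plain recursion: the dp table in A is a pure memo cache (it is
-- only ever filled with the value the recursion returns), so it never changes any value.
-- In every call reached from dfs(0, N-1) with N ≥ 1 the indices satisfy 0 ≤ l ≤ r < N,
-- so l, r are Nat and A[l] is in range (pyGetD's default is never used under Pre_solve).
def dfsA (A : List Int) (N : Nat) (l r : Nat) : Int :=
  if l = r then PySem.List.pyGetD A (l : Int) 0
  else if _h : l < r then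
    if (r - l + 1) % 2 == N % 2 then
      max (dfsA A N (l + 1) r) (dfsA A N l (r - 1))
    else
      min (dfsA A N (l + 1) r) (dfsA A N l (r - 1))
  else 0
termination_by r - l
decreasing_by all_goals omega

def solve (A : List Int) : Int :=
  dfsA A A.length 0 (A.length - 1)

-- ===== PORT B =====
-- one loop-body step of Source B: from the row of interval values of some length to the next
def stepB (N : Int) (cur : List Int) (length : Int) : List Int :=
  if length % 2 == N % 2 then
    (PySem.List.pyRange 0 ((cur.length : Int) - 1) 1).map
      (fun l => max (PySem.List.pyGetD cur (l + 1) 0) (PySem.List.pyGetD cur l 0))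
  else
    (PySem.List.pyRange 0 ((cur.length : Int) - 1) 1).map
      (fun l => min (PySem.List.pyGetD cur (l + 1) 0) (PySem.List.pyGetD cur l 0))

def solve_alt (A : List Int) : Int :=
  let N : Int := A.length
  let cur := (PySem.List.pyRange 2 (N + 1) 1).foldl (stepB N) A
  PySem.List.pyGetD cur 0 0   -- cur[0]; cur is nonempty under Pre_solve

-- ===== PRECONDITION & SPEC =====
-- A (and B) raise IndexError on the empty list (dfs indexes dp[0][-1] into an empty table).
def Pre_solve (A : List Int) : Prop := A ≠ []
instance (A : List Int) : Decidable (Pre_solve A) := by unfold Pre_solve; infer_instance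
def pvWitness_solve : List Int := ([3, -1, 4, 1])

def Spec_solve (A : List Int) (out : Int) : Prop := out = solve_alt A
instance (A : List Int) (out : Int) : Decidable (Spec_solve A out) := by unfold Spec_solve; infer_instance

-- ===== CLAIM (what is proved, stated in full; the proofs are below) =====
def Claim_equal_solve : Prop := ∀ (A : List Int), Dom_solve A → Pre_solve A → Spec_solve A (solve A)

-- ===== LEMMAS AND PROOFS =====

-- the game value of the interval of length (len+1) starting at l, by recursion on the length
def gSpec (A : List Int) (N : Nat) : Nat → Nat → Int
  | l, 0 => A.getD l 0
  | l, len + 1 =>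
    if (len + 2) % 2 == N % 2 then
      max (gSpec A N (l + 1) len) (gSpec A N l len)
    else
      min (gSpec A N (l + 1) len) (gSpec A N l len)

lemma dfsA_eq_gSpec (A : List Int) (N : Nat) :
    ∀ d l r, l ≤ r → r - l = d → dfsA A N l r = gSpec A N l d := by
  intro d
  induction d with
  | zero =>
    intro l r h1 h2
    have : l = r := by omega
    subst this
    simp [dfsA, gSpec]
  | succ d ih =>
    intro l r h1 h2
    have hne : ¬ l = r := by omega
    have hlt : l < r := by omega
    rw [dfsA]
    have hcond : r - l + 1 = d + 2 := by omega
    rw [ih (l + 1) r (by omega) (by omega), ih l (r - 1) (by omega) (by omega)]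
    simp only [hne, if_false, dif_pos hlt, hcond, gSpec]

-- the row of values of all intervals of length (L+1)
def rowB (A : List Int) (N L : Nat) : List Int :=
  (List.range (N - L)).map (fun l => gSpec A N l L)

lemma rowB_zero (A : List Int) : rowB A A.length 0 = A := by
  apply List.ext_getElem
  · simp [rowB]
  · intro i h1 h2
    simp_all [rowB, gSpec, List.getD]

lemma stepB_rowB (A : List Int) (N L : Nat) (h : L + 2 ≤ N) :
    stepB (N : Int) (rowB A N L) ((L : Int) + 2) = rowB A N (L + 1) := by
  have hlen : (rowB A N L).length = N - L := by simp [rowB]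
  have hrange : ((((rowB A N L).length : Nat) : Int) - 1) = ((N - L - 1 : Nat) : Int) := by
    rw [hlen]; omega
  have hparity : ((((L : Int) + 2) % 2 == (N : Int) % 2)) = ((L + 2) % 2 == N % 2) := by
    have h1 : ((L : Int) + 2) % 2 = (((L + 2) % 2 : Nat) : Int) := by push_cast; omega
    have h2 : (N : Int) % 2 = ((N % 2 : Nat) : Int) := by push_cast; omega
    rw [h1, h2]
    by_cases hp : (L + 2) % 2 = N % 2 <;> simp [hp] <;> omega
  have hget : ∀ l : Nat, l < N - L - 1 →
      (PySem.List.pyGetD (rowB A N L) ((l : Int) + 1) 0 = gSpec A N (l + 1) L ∧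
       PySem.List.pyGetD (rowB A N L) (l : Int) 0 = gSpec A N l L) := by
    intro l hl
    have hl1 : l + 1 < (rowB A N L).length := by rw [hlen]; omega
    have hl0 : l < (rowB A N L).length := by rw [hlen]; omega
    constructor
    · rw [show ((l : Int) + 1) = ((l + 1 : Nat) : Int) from by push_cast; ring,
        PySem.List.pyGetD_natCast, List.getD_eq_getElem _ _ hl1]
      simp [rowB]
    · rw [PySem.List.pyGetD_natCast, List.getD_eq_getElem _ _ hl0]
      simp [rowB]
  unfold stepB
  rw [hparity, hrange, PySem.List.pyRange_zero_nat]
  by_cases hp : ((L + 2) % 2 == N % 2) = true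
  · rw [if_pos hp]
    apply List.ext_getElem
    · simp [rowB]; omega
    · intro i h1 h2
      simp only [List.getElem_map, List.getElem_range]
      have hi : i < N - L - 1 := by simpa [List.length_map, List.length_range] using h1
      obtain ⟨e1, e2⟩ := hget i hi
      rw [e1, e2]
      simp only [rowB, List.getElem_map, List.getElem_range, gSpec, hp, if_pos]
  · rw [if_neg hp]
    apply List.ext_getElem
    · simp [rowB]; omega
    · intro i h1 h2
      simp only [List.getElem_map, List.getElem_range]
      have hi : i < N - L - 1 := by simpa [List.length_map, List.length_range] using h1
      obtain ⟨e1, e2⟩ := hget i hi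
      rw [e1, e2]
      simp only [rowB, List.getElem_map, List.getElem_range, gSpec, hp, if_neg, Bool.not_eq_true]

lemma foldl_rows (A : List Int) (N : Nat) (hN : N = A.length) :
    ∀ K, K ≤ N - 1 →
      (PySem.List.pyRange 2 (2 + (K : Int)) 1).foldl (stepB (N : Int)) A
        = rowB A N K := by
  intro K
  induction K with
  | zero =>
    intro _
    rw [PySem.List.pyRange_one_eq_nil (by omega)]
    simp only [List.foldl_nil]
    rw [hN]
    exact (rowB_zero A).symm
  | succ K ih =>
    intro hK
    have hsplit : PySem.List.pyRange 2 (2 + ((K + 1 : Nat) : Int)) 1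
        = PySem.List.pyRange 2 (2 + (K : Int)) 1 ++ [2 + (K : Int)] := by
      have : (2 + ((K + 1 : Nat) : Int)) = (2 + (K : Int)) + 1 := by push_cast; ring
      rw [this, PySem.List.pyRange_one_succ_right (by omega)]
    rw [hsplit, List.foldl_append, ih (by omega)]
    simp only [List.foldl_cons, List.foldl_nil]
    have : (2 + (K : Int)) = ((K : Int) + 2) := by ring
    rw [this, stepB_rowB A N K (by omega)]

-- ===== VERDICT (by name: the statement is the Claim_ definition above) =====
theorem solve_spec : Claim_equal_solve := by
  intro A _hdom hpre
  unfold Spec_solve solve solve_alt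
  have hN1 : 1 ≤ A.length := by
    cases A with
    | nil => exact absurd rfl hpre
    | cons a t => simp
  show dfsA A A.length 0 (A.length - 1)
      = PySem.List.pyGetD
          ((PySem.List.pyRange 2 ((A.length : Int) + 1) 1).foldl (stepB (A.length : Int)) A) 0 0
  rw [show ((A.length : Int) + 1) = 2 + ((A.length - 1 : Nat) : Int) from by omega,
    foldl_rows A A.length rfl (A.length - 1) (by omega)]
  have hlast : rowB A A.length (A.length - 1) = [gSpec A A.length 0 (A.length - 1)] := by
    unfold rowB
    rw [show A.length - (A.length - 1) = 1 from by omega]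
    simp
  rw [hlast, PySem.List.pyGetD_zero]
  simp only [List.getD, List.getElem?_cons_zero, Option.getD_some]
  rw [dfsA_eq_gSpec A A.length (A.length - 1) 0 (A.length - 1) (by omega) (by omega)]
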